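-- pv_equiv track=rewrite | github.com/anojkr/CodingClub | Stack/FirstNonRepeatingCharInString.py | solve
-- ===== SOURCE A (Python) =====
-- import collections
--
-- def solve(A):
--     Q = collections.deque()
--     res = []
--     HashMap = {}
--     for ele in A:
--         if HashMap.get(ele) == None:
--             HashMap[ele] = 1
--             Q.append(ele)
--         else:
--             HashMap[ele] += 1
--         while len(Q) > 0 and HashMap.get(Q[0]) > 1:
--             Q.popleft()
--         if len(Q) == 0:
--             res.append("#")
--         else:
--             res.append(Q[0])
--     return "".join(res)
-- ===== SOURCE B (Python) =====
-- def _first_unique(prefix, counts):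
--     for c in prefix:
--         if counts.get(c) == 1:
--             return c
--     return "#"
--
--
-- def solve(A):
--     counts = {}
--     out = []
--     for i, ch in enumerate(A):
--         counts[ch] = counts.get(ch, 0) + 1
--         out.append(_first_unique(A[:i + 1], counts))
--     return "".join(out)
-- ===== Notes on version B (the rewrite author's own statement) =====
-- stated objective: simpler
-- what changed: Replaces the incremental deque-of-candidates maintenance (append on first occurrence, pop-front while the front is repeated) by a plain count dictionary plus a fresh left-to-right rescan of each prefix for the first count-1 character.
import Mathlib
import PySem

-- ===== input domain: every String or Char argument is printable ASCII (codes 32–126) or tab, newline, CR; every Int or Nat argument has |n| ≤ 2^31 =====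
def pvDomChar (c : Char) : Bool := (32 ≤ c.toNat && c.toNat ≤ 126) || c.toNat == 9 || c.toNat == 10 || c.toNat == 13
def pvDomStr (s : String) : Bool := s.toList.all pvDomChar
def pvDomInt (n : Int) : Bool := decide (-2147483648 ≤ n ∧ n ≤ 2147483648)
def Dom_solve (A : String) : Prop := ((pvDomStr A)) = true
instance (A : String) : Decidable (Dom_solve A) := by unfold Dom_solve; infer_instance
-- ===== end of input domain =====

-- B replaces A's incremental deque of candidates by a count dict plus a fresh
-- left-to-right rescan of each prefix (objective: simpler; not faster).

-- ===== PORT A =====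
-- the `while len(Q) > 0 and HashMap.get(Q[0]) > 1: Q.popleft()` loop;
-- `.getD 0` is exact here: every char in Q is a key of the map, so `get` never yields None
def solvePop (H : PySem.Dict Char Int) : List Char → List Char
  | [] => []
  | q :: Q => if (H.get? q).getD 0 > 1 then solvePop H Q else q :: Q

-- one iteration of A's `for ele in A` body, state (Q, HashMap, res)
def solveStep (st : List Char × PySem.Dict Char Int × List Char) (ele : Char) :
    List Char × PySem.Dict Char Int × List Char :=
  let QH : List Char × PySem.Dict Char Int :=
    if (st.2.1.get? ele).isNone then (st.1 ++ [ele], st.2.1.insert ele 1)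
    else (st.1, st.2.1.modify ele 0 (· + 1))
  let Q2 := solvePop QH.2 QH.1
  (Q2, QH.2, st.2.2 ++ [match Q2 with | [] => '#' | q :: _ => q])

def solve (A : String) : String :=
  String.ofList (A.toList.foldl solveStep ([], PySem.Dict.empty, [])).2.2

-- ===== PORT B =====
-- B's helper `_first_unique(prefix, counts)`
def firstUnique (counts : PySem.Dict Char Int) : List Char → Char
  | [] => '#'
  | c :: rest => if counts.get? c == some 1 then c else firstUnique counts rest

-- `A[:i+1]` is ported as `take (i+1)`, exact since enumerate's indices satisfy i ≥ 0
def solve_alt (A : String) : String :=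
  let l := A.toList
  let st := (PySem.List.enumerate l 0).foldl
    (fun (acc : PySem.Dict Char Int × List Char) ic =>
      let counts := acc.1.insert ic.2 (acc.1.getD ic.2 0 + 1)
      (counts, acc.2 ++ [firstUnique counts (l.take (ic.1.toNat + 1))]))
    (PySem.Dict.empty, [])
  String.ofList st.2

-- ===== PRECONDITION & SPEC =====
def Spec_solve (A : String) (out : String) : Prop := out = solve_alt A
instance (A : String) (out : String) : Decidable (Spec_solve A out) := by unfold Spec_solve; infer_instance

-- ===== CLAIM (what is proved, stated in full; the proofs are below) =====
def Claim_equal_solve : Prop := ∀ (A : String), Dom_solve A → Spec_solve A (solve A)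

-- ===== LEMMAS AND PROOFS =====

-- first-occurrence order of the characters of p (what A's appends build)
def fo (p : List Char) : List Char :=
  p.foldl (fun acc e => if e ∈ acc then acc else acc ++ [e]) []

-- the common specification: first char of p occurring exactly once in p, else '#'
def gSpec (p : List Char) : Char :=
  match p.find? (fun c => p.count c == 1) with
  | some c => c
  | none => '#'

theorem mem_foldl_fo (l : List Char) : ∀ (acc : List Char) (c : Char),
    c ∈ l.foldl (fun acc e => if e ∈ acc then acc else acc ++ [e]) acc ↔ c ∈ acc ∨ c ∈ l := by
  induction l with
  | nil => simp
  | cons e l ih =>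
    intro acc c
    simp only [List.foldl_cons]
    by_cases he : e ∈ acc
    · simp [he, ih]
      constructor
      · rintro (h | h) <;> tauto
      · rintro (h | h | h) <;> [tauto; (subst h; tauto); tauto]
    · simp [he, ih, List.mem_append]
      tauto

theorem mem_fo (p : List Char) (c : Char) : c ∈ fo p ↔ c ∈ p := by
  simpa using mem_foldl_fo p [] c

theorem fo_append_singleton (p : List Char) (e : Char) :
    fo (p ++ [e]) = if e ∈ p then fo p else fo p ++ [e] := by
  have h1 : fo (p ++ [e]) = if e ∈ fo p then fo p else fo p ++ [e] := by
    unfold fo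
    rw [List.foldl_append]
    simp only [List.foldl_cons, List.foldl_nil]
  rw [h1]
  by_cases he : e ∈ p <;> simp [mem_fo, he]

theorem solvePop_eq_dropWhile (H : PySem.Dict Char Int) (l : List Char) :
    solvePop H l = l.dropWhile (fun q => decide ((H.get? q).getD 0 > 1)) := by
  induction l with
  | nil => rfl
  | cons q l ih =>
    simp only [solvePop, List.dropWhile_cons]
    by_cases h : (H.get? q).getD 0 > 1 <;> simp [h, ih]

theorem dropWhile_congr_mem {α : Type} (P Q : α → Bool) :
    ∀ (l : List α), (∀ c ∈ l, P c = Q c) → l.dropWhile P = l.dropWhile Q := by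
  intro l
  induction l with
  | nil => intro _; rfl
  | cons c l ih =>
    intro h
    simp only [List.dropWhile_cons]
    rw [h c (by simp)]
    by_cases hq : Q c = true
    · simp [hq, ih (fun x hx => h x (by simp [hx]))]
    · simp [hq]

theorem find?_congr_mem {α : Type} (P Q : α → Bool) :
    ∀ (l : List α), (∀ c ∈ l, P c = Q c) → l.find? P = l.find? Q := by
  intro l
  induction l with
  | nil => intro _; rfl
  | cons c l ih =>
    intro h
    simp only [List.find?_cons]
    rw [h c (by simp)]
    by_cases hq : Q c = true
    · simp [hq]
    · simp [hq, ih (fun x hx => h x (by simp [hx]))]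

theorem dropWhile_dropWhile_append {α : Type} (P Q : α → Bool) (h : ∀ c, P c = true → Q c = true) :
    ∀ (l t : List α), (l.dropWhile P ++ t).dropWhile Q = (l ++ t).dropWhile Q := by
  intro l t
  induction l with
  | nil => rfl
  | cons c l ih =>
    simp only [List.dropWhile_cons, List.cons_append, List.dropWhile_cons]
    by_cases hp : P c = true
    · simp [hp, h c hp, ih]
    · by_cases hq : Q c = true <;> simp [hp, hq]

theorem head_hash_dropWhile_eq_find? (P : α → Bool) :
    ∀ (l : List α), (match l.dropWhile (fun c => !P c) with
      | [] => none | q :: _ => some q) = l.find? P := by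
  intro l
  induction l with
  | nil => rfl
  | cons c l ih =>
    simp only [List.dropWhile_cons, List.find?_cons]
    by_cases hp : P c = true
    · simp [hp]
    · simp [hp, ih]

-- find? over the first-occurrence list equals find? over the list itself, for a
-- predicate that only holds on chars occurring at most once
theorem find?_fo (P : Char → Bool) :
    ∀ (p : List Char), (∀ c, P c = true → p.count c ≤ 1) → (fo p).find? P = p.find? P := by
  intro p
  induction p using List.reverseRecOn with
  | nil => intro _; rfl
  | append_singleton q e ih =>
    intro h
    have hq : ∀ c, P c = true → q.count c ≤ 1 := by
      intro c hc
      have := h c hc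
      rw [List.count_append] at this
      omega
    rw [fo_append_singleton, List.find?_append, ← ih hq]
    by_cases he : e ∈ q
    · rw [if_pos he]
      have hPe : P e = false := by
        by_contra hcon
        have : P e = true := by simpa using hcon
        have h2 := h e this
        rw [List.count_append] at h2
        simp at h2
        have := List.one_le_count_iff.2 he
        omega
      cases hfind : (fo q).find? P with
      | some c => rfl
      | none => simp [hPe]
    · rw [if_neg he, List.find?_append]

theorem count_le_append (p : List Char) (e c : Char) : p.count c ≤ (p ++ [e]).count c := by
  rw [List.count_append]; omega

-- A's appended character, read off the invariant, is gSpec of the prefix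
theorem bridge (p : List Char) :
    (match (fo p).dropWhile (fun c => decide (1 < p.count c)) with
      | [] => '#' | q :: _ => q) = gSpec p := by
  have hcongr : (fo p).dropWhile (fun c => decide (1 < p.count c))
      = (fo p).dropWhile (fun c => !(p.count c == 1)) := by
    apply dropWhile_congr_mem
    intro c hc
    have h1 : 1 ≤ p.count c := List.one_le_count_iff.2 ((mem_fo p c).1 hc)
    rcases Nat.lt_or_ge 1 (p.count c) with hlt | hle
    · have hne : p.count c ≠ 1 := by omega
      simp [hlt, hne]
    · have heq : p.count c = 1 := by omega
      simp [heq]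
  rw [hcongr]
  have := head_hash_dropWhile_eq_find? (fun c => p.count c == 1) (fo p)
  have hfo := find?_fo (fun c => p.count c == 1) p (by intro c hc; simp at hc; omega)
  unfold gSpec
  rw [← hfo]
  cases hdrop : (fo p).dropWhile (fun c => !(p.count c == 1)) with
  | nil => rw [hdrop] at this; simp at this; rw [← this]
  | cons q t => rw [hdrop] at this; simp at this; rw [← this]

theorem count_append_singleton (p : List Char) (e c : Char) :
    (p ++ [e]).count c = p.count c + if c = e then 1 else 0 := by
  by_cases h : c = e
  · subst h
    simp [List.count_append]
  · have h0 : List.count c [e] = 0 :=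
      List.count_eq_zero.2 (fun hm => h (List.mem_singleton.1 hm))
    rw [List.count_append, h0, if_neg h]

-- counting-dict invariant: members are mapped to their (positive, Int-cast) count
def HInv (p : List Char) (H : PySem.Dict Char Int) : Prop :=
  ∀ c, H.get? c = if p.count c = 0 then none else some (p.count c : Int)

theorem HInv_getD {p : List Char} {H : PySem.Dict Char Int} (h : HInv p H) (c : Char) :
    (H.get? c).getD 0 = if p.count c = 0 then 0 else (p.count c : Int) := by
  rw [h c]
  by_cases hc : p.count c = 0 <;> simp [hc]

theorem HInv_pred {p : List Char} {H : PySem.Dict Char Int} (h : HInv p H) (c : Char)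
    (hc : c ∈ p) : (decide ((H.get? c).getD 0 > 1)) = decide (1 < p.count c) := by
  have h1 : p.count c ≠ 0 := by
    have := List.one_le_count_iff.2 hc
    omega
  rw [HInv_getD h, if_neg h1]
  rcases Nat.lt_or_ge 1 (p.count c) with hlt | hle
  · have : (1 : Int) < (p.count c : Int) := by exact_mod_cast hlt
    simp [hlt, this]
  · have : ¬ (1 : Int) < (p.count c : Int) := by
      intro hcon
      have : 1 < p.count c := by exact_mod_cast hcon
      omega
    have h2 : ¬ 1 < p.count c := by omega
    simp [this, h2]

-- one step of A's loop, read through the invariant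
theorem stepA (p : List Char) (e : Char) (st : List Char × PySem.Dict Char Int × List Char)
    (hH : HInv p st.2.1)
    (hQ : st.1 = (fo p).dropWhile (fun c => decide (1 < p.count c))) :
    HInv (p ++ [e]) (solveStep st e).2.1 ∧
    (solveStep st e).1 = (fo (p ++ [e])).dropWhile (fun c => decide (1 < (p ++ [e]).count c)) ∧
    (solveStep st e).2.2 = st.2.2 ++ [gSpec (p ++ [e])] := by
  have hmono : ∀ c, (decide (1 < p.count c)) = true → (decide (1 < (p ++ [e]).count c)) = true := by
    intro c h
    simp only [decide_eq_true_eq] at *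
    have := count_le_append p e c
    omega
  -- the new dict and the new queue input, by A's branch
  have hbranch : (if (st.2.1.get? e).isNone then (st.1 ++ [e], st.2.1.insert e 1)
      else (st.1, st.2.1.modify e 0 (· + 1)))
      = (st.1 ++ (if e ∈ p then [] else [e]),
         st.2.1.insert e ((if e ∈ p then (p.count e : Int) else 0) + 1)) := by
    rw [hH e]
    by_cases he : e ∈ p
    · have h1 : p.count e ≠ 0 := by
        have := List.one_le_count_iff.2 he
        omega
      rw [if_neg h1]
      simp only [Option.isNone_some, Bool.false_eq_true, if_false, if_pos he,
        List.append_nil, PySem.Dict.modify]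
      have : st.2.1.getD e 0 = (p.count e : Int) := by
        rw [PySem.Dict.getD_eq_get?_getD, hH e, if_neg h1]
        rfl
      rw [this]
    · have h1 : p.count e = 0 := List.count_eq_zero.2 he
      rw [if_pos h1]
      simp [he]
  have hH' : HInv (p ++ [e]) (st.2.1.insert e ((if e ∈ p then (p.count e : Int) else 0) + 1)) := by
    intro c
    rw [PySem.Dict.get?_insert, count_append_singleton]
    by_cases hce : c = e
    · subst hce
      rw [if_pos rfl]
      simp only [if_true]
      rw [if_neg (show ¬ (p.count c + 1 = 0) by omega)]
      by_cases he : c ∈ p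
      · rw [if_pos he]
        norm_cast
      · rw [if_neg he, List.count_eq_zero.2 he]
        norm_cast
    · rw [if_neg hce, if_neg hce, Nat.add_zero, hH c]
  have hfo' : fo (p ++ [e]) = fo p ++ (if e ∈ p then [] else [e]) := by
    rw [fo_append_singleton]
    by_cases he : e ∈ p <;> simp [he]
  have hQ' : solvePop (st.2.1.insert e ((if e ∈ p then (p.count e : Int) else 0) + 1))
        (st.1 ++ (if e ∈ p then [] else [e]))
      = (fo (p ++ [e])).dropWhile (fun c => decide (1 < (p ++ [e]).count c)) := by
    rw [solvePop_eq_dropWhile]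
    rw [dropWhile_congr_mem _ (fun c => decide (1 < (p ++ [e]).count c)) _ ?mem]
    case mem =>
      intro c hc
      apply HInv_pred hH'
      rcases List.mem_append.1 hc with h | h
      · rw [hQ] at h
        have := (mem_fo p c).1 ((List.dropWhile_sublist _).subset h)
        exact List.mem_append.2 (Or.inl this)
      · by_cases he : e ∈ p
        · rw [if_pos he] at h
          simp at h
        · rw [if_neg he] at h
          simp at h
          subst h
          simp
    rw [hQ, hfo']
    rw [dropWhile_dropWhile_append _ _ hmono (fo p) (if e ∈ p then [] else [e])]
  refine ⟨?_, ?_, ?_⟩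
  · show HInv (p ++ [e]) (solveStep st e).2.1
    unfold solveStep
    rw [hbranch]
    exact hH'
  · show (solveStep st e).1 = _
    unfold solveStep
    rw [hbranch]
    exact hQ'
  · show (solveStep st e).2.2 = _
    unfold solveStep
    rw [hbranch]
    simp only
    rw [hQ']
    congr 1
    rw [← bridge (p ++ [e])]

-- invariant for A's loop over the processed prefix p
theorem A_inv : ∀ (p : List Char),
    HInv p (p.foldl solveStep ([], PySem.Dict.empty, [])).2.1 ∧
    (p.foldl solveStep ([], PySem.Dict.empty, [])).1
        = (fo p).dropWhile (fun c => decide (1 < p.count c)) ∧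
    (p.foldl solveStep ([], PySem.Dict.empty, [])).2.2
        = (List.range p.length).map (fun i => gSpec (p.take (i + 1))) := by
  intro p
  induction p using List.reverseRecOn with
  | nil =>
    refine ⟨?_, rfl, rfl⟩
    intro c
    simp [PySem.Dict.get?_empty]
  | append_singleton p e ih =>
    obtain ⟨ihH, ihQ, ihres⟩ := ih
    rw [List.foldl_append, List.foldl_cons, List.foldl_nil]
    obtain ⟨h1, h2, h3⟩ := stepA p e _ ihH ihQ
    refine ⟨h1, h2, ?_⟩
    rw [h3, ihres, List.length_append, List.length_singleton, List.range_succ, List.map_append]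
    congr 1
    · apply List.map_congr_left
      intro i hi
      simp only [List.mem_range] at hi
      rw [List.take_append_of_le_length (by omega)]
    · simp only [List.map_cons, List.map_nil]
      congr 2
      rw [List.take_of_length_le (by simp)]



theorem HInv_insert (p : List Char) (e : Char) (H : PySem.Dict Char Int) (h : HInv p H) :
    HInv (p ++ [e]) (H.insert e (H.getD e 0 + 1)) := by
  have hgd : H.getD e 0 = (p.count e : Int) := by
    rw [PySem.Dict.getD_eq_get?_getD, h e]
    by_cases h0 : p.count e = 0 <;> simp [h0]
  intro c
  rw [PySem.Dict.get?_insert, count_append_singleton, hgd]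
  by_cases hce : c = e
  · subst hce
    simp only [if_true]
    rw [if_neg (show ¬ (p.count c + 1 = 0) by omega)]
    norm_cast
  · rw [if_neg hce, if_neg hce, Nat.add_zero, h c]

theorem firstUnique_eq_find? (counts : PySem.Dict Char Int) :
    ∀ (l : List Char), firstUnique counts l
      = match l.find? (fun c => counts.get? c == some 1) with
        | some c => c
        | none => '#' := by
  intro l
  induction l with
  | nil => rfl
  | cons c l ih =>
    simp only [firstUnique, List.find?_cons]
    by_cases h : (counts.get? c == some 1) = true <;> simp [h, ih]

-- B's rescan of the prefix, read through the invariant, is gSpec of the prefix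
theorem firstUnique_g (p : List Char) (H : PySem.Dict Char Int) (h : HInv p H) :
    firstUnique H p = gSpec p := by
  rw [firstUnique_eq_find?]
  unfold gSpec
  rw [find?_congr_mem (fun c => H.get? c == some 1) (fun c => p.count c == 1) p ?me]
  case me =>
    intro c hc
    have h1 : p.count c ≠ 0 := by
      have := List.one_le_count_iff.2 hc
      omega
    show (H.get? c == some 1) = (p.count c == 1)
    rw [h c, if_neg h1]
    by_cases h2 : p.count c = 1
    · simp [h2]
    · have h3 : ((p.count c : Int) = 1) ↔ (p.count c = 1) := by
        constructor
        · intro hcon; exact_mod_cast hcon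
        · intro hcon; exact_mod_cast hcon
      simp [h2, h3]

-- invariant for B's loop over the first k characters of l
theorem B_inv (l : List Char) : ∀ (k : Nat), k ≤ l.length →
    (∀ c, ((PySem.List.enumerate (l.take k) 0).foldl
      (fun (acc : PySem.Dict Char Int × List Char) ic =>
        let counts := acc.1.insert ic.2 (acc.1.getD ic.2 0 + 1)
        (counts, acc.2 ++ [firstUnique counts (l.take (ic.1.toNat + 1))]))
      (PySem.Dict.empty, [])).1.get? c
        = if (l.take k).count c = 0 then none else some (((l.take k).count c : Nat) : Int)) ∧
    ((PySem.List.enumerate (l.take k) 0).foldl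
      (fun (acc : PySem.Dict Char Int × List Char) ic =>
        let counts := acc.1.insert ic.2 (acc.1.getD ic.2 0 + 1)
        (counts, acc.2 ++ [firstUnique counts (l.take (ic.1.toNat + 1))]))
      (PySem.Dict.empty, [])).2
        = (List.range k).map (fun i => gSpec (l.take (i + 1))) := by
  intro k
  induction k with
  | zero =>
    intro _
    constructor
    · intro c
      simp [PySem.List.enumerate_nil, PySem.Dict.get?_empty]
    · simp [PySem.List.enumerate_nil]
  | succ k ih =>
    intro hk1
    have hk : k < l.length := by omega
    obtain ⟨ihH, ihres⟩ := ih (by omega)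
    have hHk : HInv (l.take k)
        ((PySem.List.enumerate (l.take k) 0).foldl
          (fun (acc : PySem.Dict Char Int × List Char) ic =>
            let counts := acc.1.insert ic.2 (acc.1.getD ic.2 0 + 1)
            (counts, acc.2 ++ [firstUnique counts (l.take (ic.1.toNat + 1))]))
          (PySem.Dict.empty, [])).1 := ihH
    have htake : l.take (k + 1) = l.take k ++ [l[k]] := by
      rw [List.take_add_one]
      simp [List.getElem?_eq_getElem hk]
    have hlen : (l.take k).length = k := by
      rw [List.length_take]
      omega
    have henum : PySem.List.enumerate (l.take (k + 1)) 0
        = PySem.List.enumerate (l.take k) 0 ++ [((k : Int), l[k])] := by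
      rw [htake, PySem.List.enumerate_append, hlen]
      simp [PySem.List.enumerate_cons, PySem.List.enumerate_nil]
    rw [henum, List.foldl_append, List.foldl_cons, List.foldl_nil]
    simp only [Int.toNat_natCast]
    have hHk1 : HInv (l.take (k + 1))
        (((PySem.List.enumerate (l.take k) 0).foldl
          (fun (acc : PySem.Dict Char Int × List Char) ic =>
            let counts := acc.1.insert ic.2 (acc.1.getD ic.2 0 + 1)
            (counts, acc.2 ++ [firstUnique counts (l.take (ic.1.toNat + 1))]))
          (PySem.Dict.empty, [])).1.insert l[k]
            (((PySem.List.enumerate (l.take k) 0).foldl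
              (fun (acc : PySem.Dict Char Int × List Char) ic =>
                let counts := acc.1.insert ic.2 (acc.1.getD ic.2 0 + 1)
                (counts, acc.2 ++ [firstUnique counts (l.take (ic.1.toNat + 1))]))
              (PySem.Dict.empty, [])).1.getD l[k] 0 + 1)) := by
      rw [htake]
      exact HInv_insert _ _ _ hHk
    constructor
    · exact hHk1
    · rw [ihres, List.range_succ, List.map_append]
      congr 1
      simp only [List.map_cons, List.map_nil]
      congr 1
      exact firstUnique_g _ _ hHk1

-- ===== VERDICT (by name: the statement is the Claim_ definition above) =====
theorem solve_spec : Claim_equal_solve := by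
  unfold Claim_equal_solve Spec_solve
  intro A _
  have hA := (A_inv A.toList).2.2
  have hB := B_inv A.toList A.toList.length le_rfl
  rw [List.take_length] at hB
  show String.ofList ((A.toList.foldl solveStep ([], PySem.Dict.empty, [])).2.2)
      = String.ofList (((PySem.List.enumerate A.toList 0).foldl
          (fun (acc : PySem.Dict Char Int × List Char) ic =>
            let counts := acc.1.insert ic.2 (acc.1.getD ic.2 0 + 1)
            (counts, acc.2 ++ [firstUnique counts (A.toList.take (ic.1.toNat + 1))]))
          (PySem.Dict.empty, [])).2)
  rw [hA, hB.2]
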